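-- pv_equiv track=rewrite | github.com/yubinbai/pcuva-problems | 10137 The Trip/expenses.py | transferAmount
-- ===== SOURCE A (Python) =====
-- def transferAmount(expensesInCents, n):
--     currSumInCents = 0
--     for i in expensesInCents:
--         currSumInCents += i
--
--     averageInCents = currSumInCents // n
--
--     leftoverCents = currSumInCents % n
--
--     # if a person is paying more than average, let him lose the extra cent
--     # to minimize transfer
--
--     transferInCents = 0
--
--     for i in expensesInCents:
--         if i >= averageInCents:
--             if leftoverCents > 0:
--                 transferInCents += i - averageInCents - 1
--                 leftoverCents -= 1
--             else:
--                 transferInCents += i - averageInCents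
--
--     return transferInCents
-- ===== SOURCE B (Python) =====
-- def transferAmount(expensesInCents, n):
--     avg, r = divmod(sum(expensesInCents), n)
--     transfer = 0
--     for k, x in enumerate(sorted(expensesInCents, reverse=True)):
--         if x >= avg:
--             transfer += x - avg - (1 if k < r else 0)
--     return transfer
-- ===== Notes on version B (the rewrite author's own statement) =====
-- stated objective: alternative
-- what changed: Sorts the expenses in descending order and assigns the r spare cents positionally to the first r entries (index k < r), instead of A's stateful countdown of a leftover counter while scanning in input order.
import Mathlib
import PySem

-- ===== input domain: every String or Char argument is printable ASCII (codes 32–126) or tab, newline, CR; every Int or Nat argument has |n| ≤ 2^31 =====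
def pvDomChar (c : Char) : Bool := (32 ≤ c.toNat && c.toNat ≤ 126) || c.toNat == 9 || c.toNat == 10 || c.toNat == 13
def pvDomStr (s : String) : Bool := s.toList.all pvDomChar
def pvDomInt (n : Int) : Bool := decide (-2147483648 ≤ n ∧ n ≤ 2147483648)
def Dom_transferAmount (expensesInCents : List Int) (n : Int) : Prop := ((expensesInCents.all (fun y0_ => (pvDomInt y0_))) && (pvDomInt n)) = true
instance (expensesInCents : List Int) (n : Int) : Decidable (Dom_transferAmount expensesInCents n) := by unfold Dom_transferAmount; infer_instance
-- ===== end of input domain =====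

-- B sorts the expenses descending and hands the r spare cents positionally to the
-- first r entries, instead of A's stateful leftover countdown in input order; objective: alternative.

-- ===== PORT A =====
def transferAmount (expensesInCents : List Int) (n : Int) : Int :=
  let currSumInCents := expensesInCents.foldl (· + ·) 0
  let averageInCents := PySem.Int.floordiv currSumInCents n
  let leftoverCents := PySem.Int.mod currSumInCents n
  let st := expensesInCents.foldl
    (fun (st : Int × Int) i =>
      if i ≥ averageInCents then
        if st.1 > 0 then (st.1 - 1, st.2 + (i - averageInCents - 1))
        else (st.1, st.2 + (i - averageInCents))
      else st)
    (leftoverCents, 0)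
  st.2

-- ===== PORT B =====
def transferAmount_alt (expensesInCents : List Int) (n : Int) : Int :=
  let total := expensesInCents.foldl (· + ·) 0
  let avg := PySem.Int.floordiv total n
  let r := PySem.Int.mod total n
  let ys := PySem.List.sorted expensesInCents (fun x => x) true
  (ys.foldl
    (fun (st : Int × Int) x =>
      (st.1 + 1, if x ≥ avg then st.2 + (x - avg - (if st.1 < r then 1 else 0)) else st.2))
    (0, 0)).2

-- ===== PRECONDITION & SPEC =====
-- Python A raises ZeroDivisionError when n = 0; exactly that input is excluded.
def Pre_transferAmount (expensesInCents : List Int) (n : Int) : Prop := n ≠ 0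
instance (expensesInCents : List Int) (n : Int) : Decidable (Pre_transferAmount expensesInCents n) := by unfold Pre_transferAmount; infer_instance
def pvWitness_transferAmount : List Int × Int := ([100, 200, 250], 3)

def Spec_transferAmount (expensesInCents : List Int) (n : Int) (out : Int) : Prop := out = transferAmount_alt expensesInCents n
instance (expensesInCents : List Int) (n : Int) (out : Int) : Decidable (Spec_transferAmount expensesInCents n out) := by unfold Spec_transferAmount; infer_instance

-- ===== CLAIM =====
def Claim_equal_transferAmount : Prop := ∀ (expensesInCents : List Int) (n : Int), Dom_transferAmount expensesInCents n → Pre_transferAmount expensesInCents n → Spec_transferAmount expensesInCents n (transferAmount expensesInCents n)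

-- ===== LEMMAS AND PROOFS =====

-- A's stateful loop equals the filtered-excess sum minus min(max(r0,0), count).
theorem pvLoopA_eq (avg : Int) : ∀ (xs : List Int) (r0 t0 : Int),
    (xs.foldl
      (fun (st : Int × Int) i =>
        if i ≥ avg then
          if st.1 > 0 then (st.1 - 1, st.2 + (i - avg - 1))
          else (st.1, st.2 + (i - avg))
        else st)
      (r0, t0)).2
    = t0 + ((xs.filter (fun i => i ≥ avg)).map (fun i => i - avg)).sum
        - min (max r0 0) (((xs.filter (fun i => i ≥ avg)).length : Int)) := by
  intro xs
  induction xs with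
  | nil => intro r0 t0; simp
  | cons i xs ih =>
    intro r0 t0
    by_cases hi : i ≥ avg
    · by_cases hr : r0 > 0
      · simp only [List.foldl_cons, List.filter_cons, hi, hr, decide_true, if_true,
          List.map_cons, List.sum_cons, List.length_cons]
        rw [ih]; push_cast; omega
      · simp only [List.foldl_cons, List.filter_cons, hi, hr, decide_true, if_true, if_false,
          List.map_cons, List.sum_cons, List.length_cons]
        rw [ih]; push_cast; omega
    · simp only [List.foldl_cons, List.filter_cons, hi, decide_false, if_false]
      rw [ih]; simp

-- B's indexed loop over a descending list equals the same closed form, for any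
-- starting index k0 (the min correction counts the indices k0+j < r hitting the
-- ≥-avg prefix, which a descending order makes exactly min(max(r-k0,0), count)).
theorem pvLoopB_eq (avg r : Int) : ∀ (ys : List Int),
    ys.Pairwise (fun a b => b ≤ a) → ∀ (k0 t0 : Int),
    (ys.foldl
      (fun (st : Int × Int) x =>
        (st.1 + 1, if x ≥ avg then st.2 + (x - avg - (if st.1 < r then 1 else 0)) else st.2))
      (k0, t0)).2
    = t0 + ((ys.filter (fun i => i ≥ avg)).map (fun i => i - avg)).sum
        - min (max (r - k0) 0) (((ys.filter (fun i => i ≥ avg)).length : Int)) := by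
  intro ys
  induction ys with
  | nil => intro _ k0 t0; simp
  | cons x ys ih =>
    intro hp k0 t0
    rw [List.pairwise_cons] at hp
    by_cases hx : x ≥ avg
    · simp only [List.foldl_cons, List.filter_cons, hx, decide_true, if_true,
        List.map_cons, List.sum_cons, List.length_cons]
      rw [ih hp.2]
      by_cases hk : k0 < r <;> simp only [hk, if_true, if_false] <;> push_cast <;> omega
    · -- x < avg and the list descends, so every later element is < avg too.
      have hnil : ys.filter (fun i => i ≥ avg) = [] := by
        rw [List.filter_eq_nil_iff]
        intro a ha
        simp only [decide_eq_true_eq]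
        intro hge
        exact hx (le_trans hge (hp.1 a ha))
      simp only [List.foldl_cons, List.filter_cons, hx, decide_false, if_false]
      rw [ih hp.2, hnil]
      simp

-- ===== VERDICT =====
theorem transferAmount_spec : Claim_equal_transferAmount := by
  intro xs n _ _
  unfold Spec_transferAmount transferAmount transferAmount_alt
  simp only
  rw [pvLoopA_eq, pvLoopB_eq _ _ _ (PySem.List.sorted_pairwise_rev xs (fun x => x))]
  have hperm : (PySem.List.sorted xs (fun x => x) true).Perm xs :=
    PySem.List.sorted_perm xs (fun x => x) true
  have hf := hperm.filter (fun i => decide (i ≥ (PySem.Int.floordiv (xs.foldl (· + ·) 0) n)))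
  rw [(hf.map (fun i => i - (PySem.Int.floordiv (xs.foldl (· + ·) 0) n))).sum_eq, hf.length_eq]
  omega
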